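-- pv_equiv track=rewrite | github.com/pc5401/my_BOJ | 백준/Silver/8029. Density Map/Density Map.py | solve
-- ===== SOURCE A (Python) =====
-- def solve(n: int, r: int, F: list[list[int]]) -> list[list[int]]:
--     P = [[0]*(n+1) for _ in range(n+1)]
--     for i in range(1, n+1):
--         row_sum = 0
--         for j in range(1, n+1):
--             row_sum += F[i-1][j-1]
--             P[i][j] = P[i-1][j] + row_sum
--
--     W = [[0]*n for _ in range(n)]
--     for i in range(1, n+1):
--         x1 = max(1, i - r)
--         x2 = min(n, i + r)
--         for j in range(1, n+1):
--             y1 = max(1, j - r)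
--             y2 = min(n, j + r)
--             W[i-1][j-1] = (
--                 P[x2][y2]
--                 - P[x1-1][y2]
--                 - P[x2][y1-1]
--                 + P[x1-1][y1-1]
--             )
--     return W
-- ===== SOURCE B (Python) =====
-- def solve(n: int, r: int, F: list[list[int]]) -> list[list[int]]:
--     # pass 1: horizontal clamped window sums via a 1D prefix sum per row
--     H = []
--     for i in range(n):
--         pre = [0]
--         for j in range(n):
--             pre.append(pre[-1] + F[i][j])
--         H.append([pre[min(n, j + r)] - pre[max(1, j - r) - 1] for j in range(1, n + 1)])
--     # pass 2: vertical prefix sums of H, then clamped vertical window differences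
--     C = [[0] * n]
--     for row in H:
--         C.append([a + b for a, b in zip(C[-1], row)])
--     return [[C[min(n, i + r)][j] - C[max(1, i - r) - 1][j] for j in range(n)]
--             for i in range(1, n + 1)]
-- ===== Notes on version B (the rewrite author's own statement) =====
-- stated objective: alternative
-- what changed: Replaces the 2D prefix-sum table with four-corner subtraction by a separable box filter: a horizontal pass of clamped 1D prefix-window sums per row, then a vertical prefix pass over that intermediate with clamped row differences.
import Mathlib
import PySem

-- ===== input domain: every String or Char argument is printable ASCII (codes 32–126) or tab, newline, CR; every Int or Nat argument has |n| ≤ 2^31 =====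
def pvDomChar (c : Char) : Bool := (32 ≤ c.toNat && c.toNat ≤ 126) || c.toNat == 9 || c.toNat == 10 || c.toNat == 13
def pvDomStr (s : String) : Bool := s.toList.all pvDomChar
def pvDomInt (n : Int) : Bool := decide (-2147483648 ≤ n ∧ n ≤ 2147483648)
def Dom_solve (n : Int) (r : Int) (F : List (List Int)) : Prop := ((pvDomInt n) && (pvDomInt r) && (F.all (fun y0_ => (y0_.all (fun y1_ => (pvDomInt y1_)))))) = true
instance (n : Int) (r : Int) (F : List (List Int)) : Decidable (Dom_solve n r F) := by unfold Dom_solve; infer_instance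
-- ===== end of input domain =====

-- B replaces A's 2D prefix table + four-corner subtraction by a separable box filter
-- (horizontal clamped prefix-window pass per row, then a vertical prefix pass): an
-- alternative decomposition of the same O(n^2) computation.

-- ===== PORT A =====
-- A's inner loop over j: running row_sum, P[i][j] = P[i-1][j] + row_sum
def pStepA (prev frow : List Int) (acc : List Int × Int) (j : Nat) : List Int × Int :=
  let rs := acc.2 + frow.getD j 0
  (acc.1 ++ [prev.getD (j+1) 0 + rs], rs)

def pRowA (n : Nat) (prev frow : List Int) : List Int :=
  ((List.range n).foldl (pStepA prev frow) ([0], 0)).1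

-- A's outer loop over i, producing the prefix-sum rows P[0..n] in order
def buildP (n : Nat) (F : List (List Int)) : List (List Int) :=
  (List.range n).foldl (fun P i => P ++ [pRowA n (P.getD i []) (F.getD i [])])
    [List.replicate (n+1) 0]

def solve (n : Int) (r : Int) (F : List (List Int)) : List (List Int) :=
  (List.range n.toNat).map (fun (i0 : Nat) =>
    (List.range n.toNat).map (fun (j0 : Nat) =>
      ((buildP n.toNat F).getD (min n ((i0:Int)+1+r)).toNat []).getD (min n ((j0:Int)+1+r)).toNat 0
      - ((buildP n.toNat F).getD ((max 1 ((i0:Int)+1-r)) - 1).toNat []).getD (min n ((j0:Int)+1+r)).toNat 0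
      - ((buildP n.toNat F).getD (min n ((i0:Int)+1+r)).toNat []).getD ((max 1 ((j0:Int)+1-r)) - 1).toNat 0
      + ((buildP n.toNat F).getD ((max 1 ((i0:Int)+1-r)) - 1).toNat []).getD ((max 1 ((j0:Int)+1-r)) - 1).toNat 0))

-- ===== PORT B =====
-- B pass 1a: 1D prefix sums of one row, built by appending
def preRowB (n : Nat) (frow : List Int) : List Int :=
  (List.range n).foldl (fun pre j => pre ++ [pre.getLastD 0 + frow.getD j 0]) [0]

-- B pass 1b: horizontal clamped window sums from the row's prefix sums
def hRowB (n : Int) (r : Int) (pre : List Int) : List Int :=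
  (List.range n.toNat).map (fun (j0 : Nat) =>
    pre.getD (min n ((j0:Int)+1+r)).toNat 0
    - pre.getD ((max 1 ((j0:Int)+1-r)) - 1).toNat 0)

-- B pass 2a: vertical prefix rows C, appending row-wise sums
def cStep (C : List (List Int)) (row : List Int) : List (List Int) :=
  C ++ [List.zipWith (· + ·) (C.getLastD []) row]

def solve_alt (n : Int) (r : Int) (F : List (List Int)) : List (List Int) :=
  (List.range n.toNat).map (fun (i0 : Nat) =>
    (List.range n.toNat).map (fun (j0 : Nat) =>
      (((List.range n.toNat).map (fun i => hRowB n r (preRowB n.toNat (F.getD i []))) |>.foldl cStep [List.replicate n.toNat 0]).getD (min n ((i0:Int)+1+r)).toNat []).getD j0 0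
      - (((List.range n.toNat).map (fun i => hRowB n r (preRowB n.toNat (F.getD i []))) |>.foldl cStep [List.replicate n.toNat 0]).getD ((max 1 ((i0:Int)+1-r)) - 1).toNat []).getD j0 0))

-- ===== PRECONDITION & SPEC =====
-- Pre_ excludes exactly the inputs on which Python A raises IndexError: when n ≥ 1,
-- a radius r ≤ -2 makes A index P[max(1,i-r)-1] past row n at i = n, and F must have
-- at least n rows each of length at least n.  A is total (returns []) for n ≤ 0.
def Pre_solve (n : Int) (r : Int) (F : List (List Int)) : Prop :=
  0 < n → (-1 ≤ r ∧ n ≤ (F.length : Int) ∧ ∀ row ∈ F.take n.toNat, n ≤ (row.length : Int))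
instance (n : Int) (r : Int) (F : List (List Int)) : Decidable (Pre_solve n r F) := by
  unfold Pre_solve; infer_instance

def pvWitness_solve : Int × Int × List (List Int) := (2, 1, [[1, 2], [3, 4]])

def Spec_solve (n : Int) (r : Int) (F : List (List Int)) (out : List (List Int)) : Prop := out = solve_alt n r F
instance (n : Int) (r : Int) (F : List (List Int)) (out : List (List Int)) : Decidable (Spec_solve n r F out) := by unfold Spec_solve; infer_instance

-- ===== CLAIM (what is proved, stated in full; the proofs are below) =====
def Claim_equal_solve : Prop := ∀ (n : Int) (r : Int) (F : List (List Int)), Dom_solve n r F → Pre_solve n r F → Spec_solve n r F (solve n r F)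

-- ===== LEMMAS AND PROOFS =====

-- prefix sum of the first k entries of a row
def pvS (row : List Int) (k : Nat) : Int := ∑ t ∈ Finset.range k, row.getD t 0

-- 2D prefix sum: pvPS F a k = sum of the first k entries of the first a rows
def pvPS (F : List (List Int)) (a k : Nat) : Int := ∑ i ∈ Finset.range a, pvS (F.getD i []) k

theorem preRowB_eq (N : Nat) (frow : List Int) :
    preRowB N frow = (List.range (N+1)).map (pvS frow) := by
  induction N with
  | zero => simp [preRowB, pvS]
  | succ N ih =>
    have h1 : preRowB (N+1) frow
        = preRowB N frow ++ [(preRowB N frow).getLastD 0 + frow.getD N 0] := by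
      simp [preRowB, List.range_succ]
    rw [h1, ih]
    rw [show N+1+1 = (N+1)+1 from rfl, List.range_succ (n := N+1), List.map_append]
    congr 1
    have h2 : ((List.range (N+1)).map (pvS frow)).getLastD 0 = pvS frow N := by
      rw [List.range_succ, List.map_append]; simp
    rw [h2]
    simp [pvS, Finset.sum_range_succ]

theorem pRowA_fold (m : Nat) (prev frow : List Int) :
    (List.range m).foldl (pStepA prev frow) ([0], 0)
      = ((List.range (m+1)).map (fun k => if k = 0 then (0:Int) else prev.getD k 0 + pvS frow k),
         pvS frow m) := by
  induction m with
  | zero => simp [pvS]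
  | succ m ih =>
    rw [List.range_succ, List.foldl_append, ih]
    rw [show m+1+1 = (m+1)+1 from rfl, List.range_succ (n := m+1), List.map_append]
    simp [pStepA, pvS, Finset.sum_range_succ]

theorem buildP_fold (N : Nat) (F : List (List Int)) (m : Nat) :
    (List.range m).foldl (fun P i => P ++ [pRowA N (P.getD i []) (F.getD i [])])
        [List.replicate (N+1) 0]
      = (List.range (m+1)).map (fun a => (List.range (N+1)).map (fun k => pvPS F a k)) := by
  induction m with
  | zero =>
    apply List.ext_getElem <;> simp [pvPS]
  | succ m ih =>
    rw [List.range_succ, List.foldl_append, ih]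
    rw [show m+1+1 = (m+1)+1 from rfl, List.range_succ (n := m+1), List.map_append]
    have hget : ((List.range (m+1)).map (fun a => (List.range (N+1)).map (fun k => pvPS F a k))).getD m []
        = (List.range (N+1)).map (fun k => pvPS F m k) :=
      PySem.List.getD_map_range _ _ _ _ (by omega)
    simp only [List.foldl_cons, List.foldl_nil, hget, List.map_cons, List.map_nil]
    congr 1
    dsimp only
    rw [pRowA, pRowA_fold]
    dsimp only
    congr 1
    apply List.map_congr_left
    intro k hk
    rw [List.mem_range] at hk
    by_cases h0 : k = 0
    · simp [h0, pvPS, pvS]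
    · rw [if_neg h0, PySem.List.getD_map_range _ _ _ _ hk]
      simp [pvPS, Finset.sum_range_succ]

theorem zip_map_range (N : Nat) (f g : Nat → Int) :
    List.zipWith (· + ·) ((List.range N).map f) ((List.range N).map g)
      = (List.range N).map (fun j => f j + g j) := by
  apply List.ext_getElem <;> simp

theorem hRowB_eq (n r : Int) (frow : List Int) (hn : 0 < n) (hr : -1 ≤ r) :
    hRowB n r (preRowB n.toNat frow)
      = (List.range n.toNat).map (fun (j0 : Nat) =>
          pvS frow (min n ((j0:Int)+1+r)).toNat - pvS frow ((max 1 ((j0:Int)+1-r)) - 1).toNat) := by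
  unfold hRowB
  apply List.map_congr_left
  intro j0 hj
  rw [List.mem_range] at hj
  have hj' : (j0:Int) < n := by omega
  rw [preRowB_eq,
      PySem.List.getD_map_range _ _ _ _ (show (min n ((j0:Int)+1+r)).toNat < n.toNat + 1 by omega),
      PySem.List.getD_map_range _ _ _ _ (show ((max 1 ((j0:Int)+1-r)) - 1).toNat < n.toNat + 1 by omega)]

theorem cFold (n r : Int) (F : List (List Int)) (hn : 0 < n) (hr : -1 ≤ r) (m : Nat) :
    (List.range m).foldl (fun C i => cStep C (hRowB n r (preRowB n.toNat (F.getD i []))))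
        [List.replicate n.toNat 0]
      = (List.range (m+1)).map (fun a => (List.range n.toNat).map (fun (j0 : Nat) =>
          pvPS F a (min n ((j0:Int)+1+r)).toNat - pvPS F a ((max 1 ((j0:Int)+1-r)) - 1).toNat)) := by
  induction m with
  | zero =>
    apply List.ext_getElem <;> simp [pvPS]
  | succ m ih =>
    rw [List.range_succ, List.foldl_append, ih]
    rw [show m+1+1 = (m+1)+1 from rfl, List.range_succ (n := m+1), List.map_append]
    simp only [List.foldl_cons, List.foldl_nil, cStep, List.map_cons, List.map_nil]
    congr 1
    have hlast : ((List.range (m+1)).map (fun a => (List.range n.toNat).map (fun (j0 : Nat) =>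
        pvPS F a (min n ((j0:Int)+1+r)).toNat - pvPS F a ((max 1 ((j0:Int)+1-r)) - 1).toNat))).getLastD []
        = (List.range n.toNat).map (fun (j0 : Nat) =>
            pvPS F m (min n ((j0:Int)+1+r)).toNat - pvPS F m ((max 1 ((j0:Int)+1-r)) - 1).toNat) := by
      rw [List.range_succ, List.map_append]; simp
    rw [hlast, hRowB_eq n r _ hn hr, zip_map_range]
    congr 1
    apply List.map_congr_left
    intro j0 _
    simp [pvPS, Finset.sum_range_succ]
    ring

-- ===== VERDICT (by name: the statement is the Claim_ definition above) =====
theorem solve_spec : Claim_equal_solve := by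
  intro n r F _hDom hPre
  unfold Spec_solve solve solve_alt
  by_cases hn : n ≤ 0
  · have : n.toNat = 0 := by omega
    simp [this]
  · have hn' : 0 < n := by omega
    obtain ⟨hr, -, -⟩ := hPre hn'
    rw [buildP, buildP_fold, List.foldl_map, cFold n r F hn' hr]
    apply List.map_congr_left
    intro i0 hi0
    rw [List.mem_range] at hi0
    have hi' : (i0:Int) < n := by omega
    apply List.map_congr_left
    intro j0 hj0
    rw [List.mem_range] at hj0
    have hj' : (j0:Int) < n := by omega
    have bx2 : (min n ((i0:Int)+1+r)).toNat < n.toNat + 1 := by omega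
    have bx1 : ((max 1 ((i0:Int)+1-r)) - 1).toNat < n.toNat + 1 := by omega
    have by2 : (min n ((j0:Int)+1+r)).toNat < n.toNat + 1 := by omega
    have by1 : ((max 1 ((j0:Int)+1-r)) - 1).toNat < n.toNat + 1 := by omega
    simp only [PySem.List.getD_map_range _ _ _ _ bx2, PySem.List.getD_map_range _ _ _ _ bx1,
        PySem.List.getD_map_range _ _ _ _ by2, PySem.List.getD_map_range _ _ _ _ by1,
        PySem.List.getD_map_range _ _ _ _ hj0]
    ring
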